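-- pv_equiv track=rewrite | github.com/are-dynamic-2025-g6/boids | Annalyse-boids/python.py | combine_group
-- ===== SOURCE A (Python) =====
-- def combine_group(coord_dict, threshold):
--     from collections import defaultdict
--
--     combined_groups = {}
--     group_extremes = {}
--
--     for coord, group_number in coord_dict.items():
--         if isinstance(group_number, list):
--             group_number = group_number[0]
--
--         if group_number not in combined_groups:
--             combined_groups[group_number] = [coord]
--             group_extremes[group_number] = [coord[0], coord[0], coord[1], coord[1]]
--         else:
--             combined_groups[group_number].append(coord)
--             group_extremes[group_number][0] = min(group_extremes[group_number][0], coord[0])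
--             group_extremes[group_number][1] = max(group_extremes[group_number][1], coord[0])
--             group_extremes[group_number][2] = min(group_extremes[group_number][2], coord[1])
--             group_extremes[group_number][3] = max(group_extremes[group_number][3], coord[1])
--
--     parent_map = {}
--
--     def find(group):
--
--         if group not in parent_map:
--             return group
--         parent_map[group] = find(parent_map[group])
--         return parent_map[group]
--
--     def union(group1, group2):
--         root1 = find(group1)
--         root2 = find(group2)
--         if root1 != root2:
--             parent_map[root2] = root1
--     group_keys = list(group_extremes.keys())
--
--     for i in range(len(group_keys)):
--         for j in range(i + 1, len(group_keys)):
--             g1, g2 = group_keys[i], group_keys[j]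
--             ext1, ext2 = group_extremes[g1], group_extremes[g2]
--
--             if (abs(ext1[1] - ext2[0]) <= threshold and abs(ext1[0] - ext2[1]) <= threshold) and \
--                (abs(ext1[3] - ext2[2]) <= threshold and abs(ext1[2] - ext2[3]) <= threshold):
--                 union(g1, g2)
--
--     merged_groups = defaultdict(list)
--
--     for group, coords in combined_groups.items():
--         root = find(group)
--         merged_groups[root].extend(coords)
--
--     return len(merged_groups)  # Retourne le nombre de groupes après fusion
-- ===== SOURCE B (Python) =====
-- def combine_group(coord_dict, threshold):
--     # Same bucketing into per-group bounding boxes; then merge nearby groups by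
--     # eager relabeling over a flat label map instead of union-find, and count
--     # the distinct labels left.
--     extremes = {}
--     for (x, y), g in coord_dict.items():
--         if g in extremes:
--             x0, x1, y0, y1 = extremes[g]
--             extremes[g] = (min(x0, x), max(x1, x), min(y0, y), max(y1, y))
--         else:
--             extremes[g] = (x, x, y, y)
--
--     keys = list(extremes)
--     label = {g: g for g in keys}
--
--     for i in range(len(keys)):
--         for j in range(i + 1, len(keys)):
--             g1, g2 = keys[i], keys[j]
--             a, b = extremes[g1], extremes[g2]
--             if abs(a[1] - b[0]) <= threshold and abs(a[0] - b[1]) <= threshold \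
--                and abs(a[3] - b[2]) <= threshold and abs(a[2] - b[3]) <= threshold:
--                 l1, l2 = label[g1], label[g2]
--                 if l1 != l2:
--                     for k in keys:
--                         if label[k] == l2:
--                             label[k] = l1
--
--     return len(set(label.values()))
-- ===== Notes on version B (the rewrite author's own statement) =====
-- stated objective: alternative
-- what changed: B keeps the same bounding-box bucketing and i<j pair scan but replaces A's path-compressing union-find plus defaultdict regrouping with a flat label map that is eagerly relabeled on each merge, returning the number of distinct labels.
import Mathlib
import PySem

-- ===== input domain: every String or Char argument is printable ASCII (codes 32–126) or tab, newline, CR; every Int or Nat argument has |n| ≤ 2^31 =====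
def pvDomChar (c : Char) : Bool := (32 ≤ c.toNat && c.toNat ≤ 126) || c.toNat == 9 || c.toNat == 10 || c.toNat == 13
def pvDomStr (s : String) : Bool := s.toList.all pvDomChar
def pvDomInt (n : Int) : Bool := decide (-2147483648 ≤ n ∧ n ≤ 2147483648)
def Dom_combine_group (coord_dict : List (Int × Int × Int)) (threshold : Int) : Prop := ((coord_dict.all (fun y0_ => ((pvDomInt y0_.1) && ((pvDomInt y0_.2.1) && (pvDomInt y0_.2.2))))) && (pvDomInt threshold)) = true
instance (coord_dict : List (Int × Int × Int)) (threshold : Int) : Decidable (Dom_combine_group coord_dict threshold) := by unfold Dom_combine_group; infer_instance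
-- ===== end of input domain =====

-- B replaces A's union-find (path-compressing find + defaultdict regrouping) by a flat
-- label map with eager relabeling and a distinct-label count; same return value (alternative).

-- ===== PORT A =====
-- `find` with path compression, returning the updated parent_map and the root.
-- The fuel (parent_map.size + 1 at each call site) is a totality guard only: parent
-- chains visit distinct keys, so they are always shorter than the fuel.
def pvFindA : Nat → PySem.Dict Int Int → Int → PySem.Dict Int Int × Int
  | 0, pm, g => (pm, g)
  | n + 1, pm, g =>
    match pm.get? g with
    | none => (pm, g)
    | some p =>
      let r := pvFindA n pm p
      (r.1.insert g r.2, r.2)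

def pvUnionA (pm : PySem.Dict Int Int) (g1 g2 : Int) : PySem.Dict Int Int :=
  let f1 := pvFindA (pm.size + 1) pm g1
  let f2 := pvFindA (f1.1.size + 1) f1.1 g2
  if f1.2 ≠ f2.2 then f2.1.insert f2.2 f1.2 else f2.1

-- first loop of A: builds combined_groups and group_extremes ([x0, x1, y0, y1] as a 4-tuple;
-- the four in-place slot assignments become one rebuilt tuple).  group_number is an int
-- here, so Python's `isinstance(group_number, list)` test is always False and is dropped.
def pvBucketA (d : PySem.Dict (Int × Int) Int) :
    PySem.Dict Int (List (Int × Int)) × PySem.Dict Int (Int × Int × Int × Int) :=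
  d.items.foldl (fun st kv =>
    if st.1.contains kv.2 = false then
      (st.1.insert kv.2 [kv.1], st.2.insert kv.2 (kv.1.1, kv.1.1, kv.1.2, kv.1.2))
    else
      let e := st.2.getD kv.2 (0, 0, 0, 0)
      (st.1.modify kv.2 [] (fun cs => cs ++ [kv.1]),
       st.2.insert kv.2 (min e.1 kv.1.1, max e.2.1 kv.1.1, min e.2.2.1 kv.1.2, max e.2.2.2 kv.1.2)))
    (PySem.Dict.empty, PySem.Dict.empty)

-- the i < j double loop calling union on nearby bounding boxes
def pvPairLoopA (keys : List Int) (ext : PySem.Dict Int (Int × Int × Int × Int))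
    (threshold : Int) (pm0 : PySem.Dict Int Int) : PySem.Dict Int Int :=
  (PySem.List.pyRange 0 (keys.length : Int) 1).foldl (fun pm i =>
    (PySem.List.pyRange (i + 1) (keys.length : Int) 1).foldl (fun pm j =>
      let g1 := PySem.List.pyGetD keys i 0
      let g2 := PySem.List.pyGetD keys j 0
      let e1 := ext.getD g1 (0, 0, 0, 0)
      let e2 := ext.getD g2 (0, 0, 0, 0)
      if |e1.2.1 - e2.1| ≤ threshold ∧ |e1.1 - e2.2.1| ≤ threshold ∧
         |e1.2.2.2 - e2.2.2.1| ≤ threshold ∧ |e1.2.2.1 - e2.2.2.2| ≤ threshold then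
        pvUnionA pm g1 g2
      else pm) pm) pm0

def combine_group (coord_dict : List (Int × Int × Int)) (threshold : Int) : Int :=
  let d : PySem.Dict (Int × Int) Int :=
    coord_dict.foldl (fun d t => d.insert (t.1, t.2.1) t.2.2) PySem.Dict.empty
  let st := pvBucketA d
  let pm := pvPairLoopA st.2.keys st.2 threshold PySem.Dict.empty
  let fin := st.1.items.foldl
    (fun (s : PySem.Dict Int Int × PySem.Dict Int (List (Int × Int))) kv =>
      let f := pvFindA (s.1.size + 1) s.1 kv.1
      (f.1, s.2.modify f.2 [] (fun cs => cs ++ kv.2)))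
    (pm, PySem.Dict.empty)
  (fin.2.size : Int)

-- ===== PORT B =====
-- first loop of B: per-group bounding boxes
def pvBucketB (d : PySem.Dict (Int × Int) Int) : PySem.Dict Int (Int × Int × Int × Int) :=
  d.items.foldl (fun ext kv =>
    if ext.contains kv.2 = true then
      let e := ext.getD kv.2 (0, 0, 0, 0)
      ext.insert kv.2 (min e.1 kv.1.1, max e.2.1 kv.1.1, min e.2.2.1 kv.1.2, max e.2.2.2 kv.1.2)
    else ext.insert kv.2 (kv.1.1, kv.1.1, kv.1.2, kv.1.2)) PySem.Dict.empty

-- `for k in keys: if label[k] == l2: label[k] = l1` (label[k] is always present: keys = label.keys)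
def pvRelabelB (keys : List Int) (lb : PySem.Dict Int Int) (l1 l2 : Int) : PySem.Dict Int Int :=
  keys.foldl (fun lb k => if lb.getD k 0 = l2 then lb.insert k l1 else lb) lb

-- the i < j double loop merging labels of nearby bounding boxes
def pvPairLoopB (keys : List Int) (ext : PySem.Dict Int (Int × Int × Int × Int))
    (threshold : Int) (lb0 : PySem.Dict Int Int) : PySem.Dict Int Int :=
  (PySem.List.pyRange 0 (keys.length : Int) 1).foldl (fun lb i =>
    (PySem.List.pyRange (i + 1) (keys.length : Int) 1).foldl (fun lb j =>
      let g1 := PySem.List.pyGetD keys i 0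
      let g2 := PySem.List.pyGetD keys j 0
      let e1 := ext.getD g1 (0, 0, 0, 0)
      let e2 := ext.getD g2 (0, 0, 0, 0)
      if |e1.2.1 - e2.1| ≤ threshold ∧ |e1.1 - e2.2.1| ≤ threshold ∧
         |e1.2.2.2 - e2.2.2.1| ≤ threshold ∧ |e1.2.2.1 - e2.2.2.2| ≤ threshold then
        let l1 := lb.getD g1 0
        let l2 := lb.getD g2 0
        if l1 ≠ l2 then pvRelabelB keys lb l1 l2 else lb
      else lb) lb) lb0

def combine_group_alt (coord_dict : List (Int × Int × Int)) (threshold : Int) : Int :=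
  let d : PySem.Dict (Int × Int) Int :=
    coord_dict.foldl (fun d t => d.insert (t.1, t.2.1) t.2.2) PySem.Dict.empty
  let ext := pvBucketB d
  let keys := ext.keys
  let lb0 := keys.foldl (fun lb g => lb.insert g g) PySem.Dict.empty
  let lb := pvPairLoopB keys ext threshold lb0
  ((PySem.Set.ofList lb.values).length : Int)

-- ===== PRECONDITION & SPEC =====
def Spec_combine_group (coord_dict : List (Int × Int × Int)) (threshold : Int) (out : Int) : Prop := out = combine_group_alt coord_dict threshold
instance (coord_dict : List (Int × Int × Int)) (threshold : Int) (out : Int) : Decidable (Spec_combine_group coord_dict threshold out) := by unfold Spec_combine_group; infer_instance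

-- ===== CLAIM (what is proved, stated in full; the proofs are below) =====
def Claim_equal_combine_group : Prop := ∀ (coord_dict : List (Int × Int × Int)) (threshold : Int), Dom_combine_group coord_dict threshold → Spec_combine_group coord_dict threshold (combine_group coord_dict threshold)

-- ===== LEMMAS AND PROOFS =====

-- the label a group carries in B's label map (identity outside the map)
def pvLab (lb : PySem.Dict Int Int) (g : Int) : Int := lb.getD g g

-- parent pointers only ever point forwards in insertion order (or out of the map):
-- no value equals its own key or an earlier key
def pvAcyc (l : List (Int × Int)) : Prop :=
  l.Pairwise (fun a b => b.2 ≠ a.1) ∧ ∀ x ∈ l, x.2 ≠ x.1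

-- the simulation invariant: A's parent_map pm and B's label map lb describe the same
-- partition of keys0 — every find-root is the label, labels are roots, roots are fixed
def pvInv (keys0 : List Int) (pm lb : PySem.Dict Int Int) : Prop :=
  keys0.Nodup ∧ pm.keys.Nodup ∧ lb.keys = keys0 ∧ pvAcyc pm.items ∧
  (∀ g p, pm.get? g = some p → pvLab lb p = pvLab lb g) ∧
  (∀ g, pm.get? (pvLab lb g) = none) ∧
  (∀ g, pm.get? g = none → pvLab lb g = g) ∧
  (∀ g ∈ keys0, pvLab lb g ∈ keys0)

lemma pvSize {κ ν : Type} [BEq κ] (d : PySem.Dict κ ν) : d.size = d.keys.length := by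
  simp [PySem.Dict.size, PySem.Dict.keys]

lemma pvMem_of_get?_some (d : PySem.Dict Int Int) (k v : Int) (h : d.get? k = some v) :
    k ∈ d.keys := by
  by_cases hk : k ∈ d.keys
  · exact hk
  · rw [(PySem.Dict.get?_eq_none_iff_not_mem_keys d k).mpr hk] at h; cases h

lemma pvGetD_mem (lb : PySem.Dict Int Int) (x : Int) (hx : x ∈ lb.keys) (dflt : Int) :
    lb.getD x dflt = pvLab lb x := by
  have hc : lb.contains x = true := (PySem.Dict.contains_iff_mem_keys lb x).mpr hx
  rw [PySem.Dict.contains_eq_isSome_get?] at hc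
  obtain ⟨v, hv⟩ := Option.isSome_iff_exists.mp hc
  rw [pvLab, PySem.Dict.getD_of_get?_eq_some lb dflt hv, PySem.Dict.getD_of_get?_eq_some lb x hv]

lemma pvChain (pm : PySem.Dict Int Int) (hnd : pm.keys.Nodup) (hac : pvAcyc pm.items)
    (g p : Int) (h : pm.get? g = some p) :
    pm.keys.length - pm.keys.idxOf p < pm.keys.length - pm.keys.idxOf g := by
  obtain ⟨hpw, hself⟩ := hac
  have hg : g ∈ pm.keys := pvMem_of_get?_some pm g p h
  have hkeys : pm.keys = pm.items.map Prod.fst := rfl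
  have hlen : pm.items.length = pm.keys.length := by rw [hkeys, List.length_map]
  set i := pm.keys.idxOf g with hidef
  have hi : i < pm.keys.length := List.idxOf_lt_length_of_mem hg
  have hii : i < pm.items.length := by omega
  have hig : pm.keys[i]'hi = g := List.getElem_idxOf hi
  have hfst : (pm.items[i]'hii).1 = g := by
    have hq : pm.keys[i]? = some g := by rw [List.getElem?_eq_getElem hi, hig]
    have hq2 : pm.keys[i]? = (pm.items[i]?).map Prod.fst := by
      rw [hkeys, List.getElem?_map]
    have hq3 : pm.items[i]? = some (pm.items[i]'hii) := List.getElem?_eq_getElem hii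
    rw [hq2, hq3] at hq
    simpa using hq
  have hsnd : (pm.items[i]'hii).2 = p := by
    have hmem : pm.items[i]'hii ∈ pm.items := List.getElem_mem _
    have hmem' : ((pm.items[i]'hii).1, (pm.items[i]'hii).2) ∈ pm.items := by simp [hmem]
    have h2 := PySem.Dict.get?_of_mem_items pm hmem' hnd
    rw [hfst] at h2
    have := h.symm.trans h2
    exact (Option.some.injEq _ _ ▸ this).symm
  by_cases hp : p ∈ pm.keys
  · set j := pm.keys.idxOf p with hjdef
    have hj : j < pm.keys.length := List.idxOf_lt_length_of_mem hp
    have hjj : j < pm.items.length := by omega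
    have hjp : pm.keys[j]'hj = p := List.getElem_idxOf hj
    have hjfst : (pm.items[j]'hjj).1 = p := by
      have hq : pm.keys[j]? = some p := by rw [List.getElem?_eq_getElem hj, hjp]
      have hq2 : pm.keys[j]? = (pm.items[j]?).map Prod.fst := by
        rw [hkeys, List.getElem?_map]
      have hq3 : pm.items[j]? = some (pm.items[j]'hjj) := List.getElem?_eq_getElem hjj
      rw [hq2, hq3] at hq
      simpa using hq
    rcases lt_trichotomy j i with hji | hji | hji
    · exfalso
      have hpair := List.pairwise_iff_getElem.mp hpw j i hjj hii hji
      rw [hsnd, hjfst] at hpair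
      exact hpair rfl
    · exfalso
      have hsf := hself _ (List.getElem_mem hii)
      rw [hsnd, hfst] at hsf
      have hgi : pm.keys[j]'hj = pm.keys[i]'hi := by congr 1
      exact hsf ((hjp.symm.trans hgi).trans hig)
    · omega
  · have : pm.keys.idxOf p = pm.keys.length := List.idxOf_eq_length hp
    omega

lemma pvAcyc_overwrite (l : List (Int × Int)) (g r : Int) (hac : pvAcyc l)
    (hr : r ∉ l.map Prod.fst) (hrg : r ≠ g) :
    pvAcyc (l.map (fun q => if q.1 == g then (g, r) else q)) := by
  obtain ⟨hpw, hself⟩ := hac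
  constructor
  · rw [List.pairwise_map]
    refine hpw.imp_of_mem ?_
    intro a b ha hb hR
    have hafst : (if (a.1 == g) = true then ((g, r) : Int × Int) else a).1 = a.1 := by
      split <;> simp_all
    rw [hafst]
    split
    · intro hcon
      exact hr (by rw [show r = a.1 from hcon]; exact List.mem_map_of_mem ha)
    · exact hR
  · intro x hx
    obtain ⟨y, hy, rfl⟩ := List.mem_map.mp hx
    split
    · exact hrg
    · exact hself y hy

lemma pvAcyc_append (l : List (Int × Int)) (r2 r1 : Int) (hac : pvAcyc l)
    (hr1 : r1 ∉ l.map Prod.fst) (hne : r1 ≠ r2) :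
    pvAcyc (l ++ [(r2, r1)]) := by
  obtain ⟨hpw, hself⟩ := hac
  constructor
  · rw [List.pairwise_append]
    refine ⟨hpw, by simp, ?_⟩
    intro a ha b hb
    simp only [List.mem_singleton] at hb
    subst hb
    intro hcon
    exact hr1 (by rw [show r1 = a.1 from hcon]; exact List.mem_map_of_mem ha)
  · intro x hx
    rcases List.mem_append.mp hx with hx | hx
    · exact hself x hx
    · simp only [List.mem_singleton] at hx; subst hx; exact hne

-- path compression: re-pointing a key at its own root preserves the invariant
lemma pvInv_compress (keys0 : List Int) (lb pm : PySem.Dict Int Int) (g : Int)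
    (h : pvInv keys0 pm lb) (hg : g ∈ pm.keys) :
    pvInv keys0 (pm.insert g (pvLab lb g)) lb ∧ (pm.insert g (pvLab lb g)).keys = pm.keys := by
  obtain ⟨hnd0, hndk, hlbk, hac, h1, h2, h3, h5⟩ := h
  have hcont : pm.contains g = true := (PySem.Dict.contains_iff_mem_keys pm g).mpr hg
  have hkeq : (pm.insert g (pvLab lb g)).keys = pm.keys :=
    PySem.Dict.keys_insert_of_contains pm _ hcont
  have hr : pm.get? (pvLab lb g) = none := h2 g
  have hrnm : pvLab lb g ∉ pm.keys := (PySem.Dict.get?_eq_none_iff_not_mem_keys pm _).mp hr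
  have hrg : pvLab lb g ≠ g := fun e => hrnm (by rw [e]; exact hg)
  have hrfix : pvLab lb (pvLab lb g) = pvLab lb g := h3 _ hr
  have hgne : pm.get? g ≠ none := fun hnone =>
    (PySem.Dict.get?_eq_none_iff_not_mem_keys pm g).mp hnone hg
  refine ⟨⟨hnd0, by rw [hkeq]; exact hndk, hlbk, ?_, ?_, ?_, ?_, h5⟩, hkeq⟩
  · rw [PySem.Dict.items_insert_of_contains pm _ hcont]
    exact pvAcyc_overwrite pm.items g (pvLab lb g) hac (by exact hrnm) hrg
  · intro x p hx
    rw [PySem.Dict.get?_insert] at hx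
    split at hx
    · rename_i hxg
      have hp : pvLab lb g = p := by injection hx
      rw [hxg, ← hp, hrfix]
    · exact h1 x p hx
  · intro x
    rw [PySem.Dict.get?_insert]
    split
    · rename_i hxg
      exact absurd (by rw [← hxg]; exact h2 x : pm.get? g = none) hgne
    · exact h2 x
  · intro x hx
    rw [PySem.Dict.get?_insert] at hx
    split at hx
    · cases hx
    · exact h3 x hx

-- find returns the label and preserves the invariant and the key set
lemma pvFind_spec (keys0 : List Int) (lb : PySem.Dict Int Int) :
    ∀ (n : Nat) (pm : PySem.Dict Int Int) (g : Int), pvInv keys0 pm lb →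
      pm.keys.length - pm.keys.idxOf g < n →
      (pvFindA n pm g).2 = pvLab lb g ∧ (pvFindA n pm g).1.keys = pm.keys ∧
      pvInv keys0 (pvFindA n pm g).1 lb := by
  intro n
  induction n with
  | zero => intro pm g h hf; omega
  | succ n ih =>
    intro pm g h hf
    cases hpg : pm.get? g with
    | none =>
      have h3 := h.2.2.2.2.2.2.1
      refine ⟨?_, ?_, ?_⟩ <;> simp only [pvFindA, hpg]
      · exact (h3 g hpg).symm
      · exact h
    | some p =>
      have hchain := pvChain pm h.2.1 h.2.2.2.1 g p hpg
      obtain ⟨hv, hk, hInv⟩ := ih pm p h (by omega)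
      have e : pvFindA (n + 1) pm g
          = ((pvFindA n pm p).1.insert g (pvFindA n pm p).2, (pvFindA n pm p).2) := by
        simp only [pvFindA, hpg]
      have hlabeq : pvLab lb p = pvLab lb g := h.2.2.2.2.1 g p hpg
      have hgmem : g ∈ (pvFindA n pm p).1.keys := by
        rw [hk]; exact pvMem_of_get?_some pm g p hpg
      have hcomp := pvInv_compress keys0 lb (pvFindA n pm p).1 g hInv hgmem
      rw [e]
      refine ⟨by simpa using hv.trans hlabeq, ?_, ?_⟩
      · show ((pvFindA n pm p).1.insert g (pvFindA n pm p).2).keys = pm.keys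
        rw [hv, hlabeq, hcomp.2, hk]
      · show pvInv keys0 ((pvFindA n pm p).1.insert g (pvFindA n pm p).2) lb
        rw [hv, hlabeq]
        exact hcomp.1

lemma pvRelabel_spec (l1 l2 : Int) :
    ∀ (ks : List Int) (lb : PySem.Dict Int Int), ks.Nodup → (∀ k ∈ ks, k ∈ lb.keys) →
    (pvRelabelB ks lb l1 l2).keys = lb.keys ∧
    (∀ x, (pvRelabelB ks lb l1 l2).get? x =
      if x ∈ ks ∧ lb.get? x = some l2 then some l1 else lb.get? x) := by
  intro ks
  induction ks with
  | nil =>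
    intro lb _ _
    exact ⟨rfl, fun x => by simp [pvRelabelB]⟩
  | cons k ks ih =>
    intro lb hnd hk
    have hkm : k ∈ lb.keys := hk k (List.mem_cons_self)
    have hc : lb.contains k = true := (PySem.Dict.contains_iff_mem_keys lb k).mpr hkm
    obtain ⟨v, hv⟩ := Option.isSome_iff_exists.mp
      ((PySem.Dict.contains_eq_isSome_get? lb k) ▸ hc)
    have hgd : lb.getD k 0 = v := PySem.Dict.getD_of_get?_eq_some lb 0 hv
    have step : pvRelabelB (k :: ks) lb l1 l2
        = pvRelabelB ks (if lb.getD k 0 = l2 then lb.insert k l1 else lb) l1 l2 := by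
      simp only [pvRelabelB, List.foldl_cons]
    have hkeys' : (if lb.getD k 0 = l2 then lb.insert k l1 else lb).keys = lb.keys := by
      split
      · exact PySem.Dict.keys_insert_of_contains lb l1 hc
      · rfl
    have ih' := ih (if lb.getD k 0 = l2 then lb.insert k l1 else lb) (List.Nodup.of_cons hnd)
      (fun x hx => by rw [hkeys']; exact hk x (List.mem_cons_of_mem _ hx))
    refine ⟨by rw [step, ih'.1, hkeys'], ?_⟩
    intro x
    rw [step, ih'.2 x]
    by_cases hxk : x = k
    · subst hxk
      have hxnotks : x ∉ ks := (List.nodup_cons.mp hnd).1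
      by_cases hveq : v = l2
      · simp [hxnotks, hv, hveq, hgd]
      · simp [hxnotks, hv, hveq, hgd]
    · have hlb'x : (if lb.getD k 0 = l2 then lb.insert k l1 else lb).get? x = lb.get? x := by
        split
        · exact PySem.Dict.get?_insert_of_ne lb l1 hxk
        · rfl
      rw [hlb'x]
      simp [List.mem_cons, hxk]

lemma pvLab_relabel (keys0 : List Int) (lb : PySem.Dict Int Int) (hnd : keys0.Nodup)
    (hk : lb.keys = keys0) (l1 l2 : Int) (hl2 : l2 ∈ keys0) (x : Int) :
    pvLab (pvRelabelB keys0 lb l1 l2) x = if pvLab lb x = l2 then l1 else pvLab lb x := by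
  have hspec := pvRelabel_spec l1 l2 keys0 lb hnd (fun k hk' => by rw [hk]; exact hk')
  unfold pvLab
  rw [PySem.Dict.getD_eq_get?_getD, PySem.Dict.getD_eq_get?_getD, hspec.2 x]
  by_cases hx : x ∈ keys0
  · have hxm : x ∈ lb.keys := by rw [hk]; exact hx
    have hc : lb.contains x = true := (PySem.Dict.contains_iff_mem_keys lb x).mpr hxm
    obtain ⟨v, hv⟩ := Option.isSome_iff_exists.mp
      ((PySem.Dict.contains_eq_isSome_get? lb x) ▸ hc)
    rw [hv]
    by_cases hvl : v = l2 <;> simp [hx, hvl]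
  · have hnone : lb.get? x = none :=
      (PySem.Dict.get?_eq_none_iff_not_mem_keys lb x).mpr (by rw [hk]; exact hx)
    have hxl2 : x ≠ l2 := fun e => hx (e ▸ hl2)
    rw [hnone]
    simp [hxl2]

lemma pvFuel (d : PySem.Dict Int Int) (x : Int) :
    d.keys.length - d.keys.idxOf x < d.size + 1 := by
  rw [pvSize]; omega

-- one union in A corresponds to one (guarded) relabel in B
lemma pvUnion_spec (keys0 : List Int) (lb pm : PySem.Dict Int Int) (g1 g2 : Int)
    (h : pvInv keys0 pm lb) (h1 : g1 ∈ keys0) (h2 : g2 ∈ keys0) :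
    pvInv keys0 (pvUnionA pm g1 g2)
      (if lb.getD g1 0 ≠ lb.getD g2 0 then pvRelabelB keys0 lb (lb.getD g1 0) (lb.getD g2 0)
       else lb) := by
  have hlbk : lb.keys = keys0 := h.2.2.1
  have h5 := h.2.2.2.2.2.2.2
  have hg1m : g1 ∈ lb.keys := by rw [hlbk]; exact h1
  have hg2m : g2 ∈ lb.keys := by rw [hlbk]; exact h2
  have hszpm : pm.size = pm.keys.length := pvSize pm
  obtain ⟨hr1, hk1, hI1⟩ := pvFind_spec keys0 lb (pm.size + 1) pm g1 h (pvFuel pm g1)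
  obtain ⟨hr2, hk2, hI2⟩ := pvFind_spec keys0 lb ((pvFindA (pm.size + 1) pm g1).1.size + 1)
    (pvFindA (pm.size + 1) pm g1).1 g2 hI1 (pvFuel _ g2)
  have hg1d : lb.getD g1 0 = pvLab lb g1 := pvGetD_mem lb g1 hg1m 0
  have hg2d : lb.getD g2 0 = pvLab lb g2 := pvGetD_mem lb g2 hg2m 0
  set f2 := pvFindA ((pvFindA (pm.size + 1) pm g1).1.size + 1) (pvFindA (pm.size + 1) pm g1).1 g2
    with hf2def
  have hU : pvUnionA pm g1 g2
      = if pvLab lb g1 ≠ pvLab lb g2 then f2.1.insert (pvLab lb g2) (pvLab lb g1) else f2.1 := by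
    rw [pvUnionA]
    simp only [← hf2def, hr1, hr2]
  rw [hU, hg1d, hg2d]
  by_cases hroots : pvLab lb g1 = pvLab lb g2
  · rw [if_neg (not_not_intro hroots), if_neg (not_not_intro hroots)]
    exact hI2
  · rw [if_pos hroots, if_pos hroots]
    -- the merged parent map against the relabeled label map
    obtain ⟨hnd0, hndk2, _, hac2, h1₂, h2₂, h3₂, _⟩ := hI2
    set l1 := pvLab lb g1
    set l2 := pvLab lb g2
    have hl2k : l2 ∈ keys0 := h5 g2 h2
    have hl1k : l1 ∈ keys0 := h5 g1 h1
    have hrl1 : f2.1.get? l1 = none := h2₂ g1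
    have hrl2 : f2.1.get? l2 = none := h2₂ g2
    have hl1nm : l1 ∉ f2.1.keys := (PySem.Dict.get?_eq_none_iff_not_mem_keys f2.1 l1).mp hrl1
    have hl2nm : l2 ∉ f2.1.keys := (PySem.Dict.get?_eq_none_iff_not_mem_keys f2.1 l2).mp hrl2
    have hnc : f2.1.contains l2 = false := by
      rw [PySem.Dict.contains_eq_decide_mem_keys]; simpa using hl2nm
    have hl1fix : pvLab lb l1 = l1 := h3₂ l1 hrl1
    have hl2fix : pvLab lb l2 = l2 := h3₂ l2 hrl2
    have hrel := pvRelabel_spec l1 l2 keys0 lb hnd0 (fun k hk' => by rw [hlbk]; exact hk')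
    have hlab' : ∀ x, pvLab (pvRelabelB keys0 lb l1 l2) x
        = if pvLab lb x = l2 then l1 else pvLab lb x :=
      fun x => pvLab_relabel keys0 lb hnd0 hlbk l1 l2 hl2k x
    have hkeys' : (f2.1.insert l2 l1).keys = f2.1.keys ++ [l2] :=
      PySem.Dict.keys_insert_of_not_contains f2.1 l1 hnc
    refine ⟨hnd0, ?_, by rw [hrel.1, hlbk], ?_, ?_, ?_, ?_, ?_⟩
    · rw [hkeys', List.nodup_append]
      refine ⟨hndk2, List.nodup_singleton _, ?_⟩
      intro a ha b hb hab
      have hb2 : b = l2 := by simpa using hb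
      exact hl2nm ((hab.trans hb2) ▸ ha)
    · rw [PySem.Dict.items_insert_of_not_contains f2.1 l1 hnc]
      exact pvAcyc_append f2.1.items l2 l1 hac2 hl1nm (fun e => hroots e)
    · intro x p hx
      rw [PySem.Dict.get?_insert] at hx
      split at hx
      · rename_i hxl2
        have hp : l1 = p := by injection hx
        rw [hxl2, ← hp, hlab', hlab', hl1fix, hl2fix, if_neg hroots, if_pos rfl]
      · have := h1₂ x p hx
        rw [hlab', hlab', this]
    · intro x
      rw [PySem.Dict.get?_insert, hlab']
      by_cases hcase : pvLab lb x = l2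
      · rw [if_pos hcase, if_neg hroots]
        exact hrl1
      · rw [if_neg hcase, if_neg hcase]
        exact h2₂ x
    · intro x hx
      rw [PySem.Dict.get?_insert] at hx
      split at hx
      · cases hx
      · rename_i hxl2
        have hfix : pvLab lb x = x := h3₂ x hx
        rw [hlab', hfix, if_neg hxl2]
    · intro x hx
      rw [hlab']
      split
      · exact hl1k
      · exact h5 x hx

lemma pvFoldRel {α β γ : Type} (R : α → β → Prop) (f : α → γ → α) (g : β → γ → β)
    (l : List γ) (h : ∀ x ∈ l, ∀ a b, R a b → R (f a x) (g b x)) :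
    ∀ (a : α) (b : β), R a b → R (l.foldl f a) (l.foldl g b) := by
  revert h
  induction l with
  | nil => intro h a b hr; exact hr
  | cons x xs ih =>
    intro h a b hr
    exact ih (fun y hy a b hr => h y (List.mem_cons_of_mem _ hy) a b hr) _ _
      (h x (List.mem_cons_self) a b hr)

lemma pvMemRange (keys : List Int) (i : Int) (hi : 0 ≤ i) (hlen : i < (keys.length : Int)) :
    PySem.List.pyGetD keys i 0 ∈ keys := by
  rw [PySem.List.pyGetD_eq_getElem keys 0 hi hlen]
  exact List.getElem_mem _

lemma pvPairLoop_rel (keys0 : List Int) (ext : PySem.Dict Int (Int × Int × Int × Int))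
    (threshold : Int) (pm0 lb0 : PySem.Dict Int Int) (h : pvInv keys0 pm0 lb0) :
    pvInv keys0 (pvPairLoopA keys0 ext threshold pm0) (pvPairLoopB keys0 ext threshold lb0) := by
  unfold pvPairLoopA pvPairLoopB
  refine pvFoldRel (pvInv keys0) _ _ _ ?_ pm0 lb0 h
  intro i hi pm lb hR
  refine pvFoldRel (pvInv keys0) _ _ _ ?_ pm lb hR
  intro j hj pm' lb' hR'
  obtain ⟨hi0, hilen⟩ := PySem.List.mem_pyRange_one.mp hi
  obtain ⟨hj0, hjlen⟩ := PySem.List.mem_pyRange_one.mp hj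
  have hg1 := pvMemRange keys0 i hi0 hilen
  have hg2 := pvMemRange keys0 j (by omega) hjlen
  dsimp only
  split
  · exact pvUnion_spec keys0 lb' pm' _ _ hR' hg1 hg2
  · exact hR'

-- the two bucketing loops build the same extremes dict, with matching key sets
lemma pvBucket_rel (d : PySem.Dict (Int × Int) Int) :
    (pvBucketA d).1.keys = (pvBucketA d).2.keys ∧ (pvBucketA d).2 = pvBucketB d ∧
    (pvBucketB d).keys.Nodup := by
  unfold pvBucketA pvBucketB
  refine pvFoldRel
    (fun (st : PySem.Dict Int (List (Int × Int)) × PySem.Dict Int (Int × Int × Int × Int))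
         (e : PySem.Dict Int (Int × Int × Int × Int)) =>
      st.1.keys = st.2.keys ∧ st.2 = e ∧ e.keys.Nodup) _ _ d.items ?_
    (PySem.Dict.empty, PySem.Dict.empty) PySem.Dict.empty ⟨by simp, rfl, by simp⟩
  intro kv _ st e hRst
  obtain ⟨hkeys, heq, hnd⟩ := hRst
  obtain ⟨cg, ex⟩ := st
  dsimp only at hkeys heq ⊢
  subst heq
  have hcont : cg.contains kv.2 = ex.contains kv.2 := by
    rw [PySem.Dict.contains_eq_decide_mem_keys, PySem.Dict.contains_eq_decide_mem_keys, hkeys]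
  by_cases hc : ex.contains kv.2 = true
  · rw [if_neg (by rw [hcont, hc]; simp), if_pos hc]
    refine ⟨?_, rfl, ?_⟩
    · dsimp only
      rw [PySem.Dict.keys_modify, PySem.Dict.keys_insert_of_contains _ _ (by rw [hcont]; exact hc),
          PySem.Dict.keys_insert_of_contains _ _ hc, hkeys]
    · rw [PySem.Dict.keys_insert_of_contains _ _ hc]; exact hnd
  · have hcf : ex.contains kv.2 = false := by simpa using hc
    rw [if_pos (by rw [hcont]; exact hcf), if_neg hc]
    refine ⟨?_, rfl, PySem.Dict.nodup_keys_insert _ _ _ hnd⟩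
    dsimp only
    rw [PySem.Dict.keys_insert_of_not_contains _ _ (by rw [hcont]; exact hcf),
        PySem.Dict.keys_insert_of_not_contains _ _ hcf, hkeys]

lemma pvInit_get? : ∀ (ks : List Int) (d : PySem.Dict Int Int) (x : Int),
    (ks.foldl (fun lb g => lb.insert g g) d).get? x = if x ∈ ks then some x else d.get? x := by
  intro ks
  induction ks with
  | nil => intro d x; simp
  | cons k ks ih =>
    intro d x
    rw [List.foldl_cons, ih]
    by_cases hx : x ∈ ks
    · simp [hx]
    · by_cases hxk : x = k
      · subst hxk; simp [hx]
      · simp [hx, hxk, PySem.Dict.get?_insert]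

lemma pvInit_keys (ks : List Int) (hnd : ks.Nodup) :
    (ks.foldl (fun lb g => lb.insert g g) PySem.Dict.empty).keys = ks := by
  rw [PySem.Dict.keys_foldl_insert (f := fun _ x => x), PySem.Dict.keys_empty,
    PySem.Set.update_nil_left, PySem.Set.ofList_eq_self_of_nodup _ hnd]

lemma pvInv_init (keys0 : List Int) (hnd : keys0.Nodup) :
    pvInv keys0 PySem.Dict.empty (keys0.foldl (fun lb g => lb.insert g g) PySem.Dict.empty) := by
  have hlab : ∀ x, pvLab (keys0.foldl (fun lb g => lb.insert g g) PySem.Dict.empty) x = x := by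
    intro x
    rw [pvLab, PySem.Dict.getD_eq_get?_getD, pvInit_get?]
    by_cases hx : x ∈ keys0 <;> simp [hx]
  refine ⟨hnd, by simp, pvInit_keys keys0 hnd, ?_, ?_, ?_, ?_, ?_⟩
  · constructor <;> simp [PySem.Dict.empty]
  · intro g p hg; simp [PySem.Dict.get?_empty] at hg
  · intro g; simp [PySem.Dict.get?_empty]
  · intro g _; exact hlab g
  · intro g hg; rw [hlab]; exact hg

-- A's final regrouping loop: the merged dict's keys are exactly the labels seen, in order
lemma pvMerge_keys (keys0 : List Int) (lb : PySem.Dict Int Int) :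
    ∀ (l : List (Int × List (Int × Int))) (pm : PySem.Dict Int Int)
      (md : PySem.Dict Int (List (Int × Int))), pvInv keys0 pm lb →
    (l.foldl (fun s kv =>
        let f := pvFindA (s.1.size + 1) s.1 kv.1
        (f.1, s.2.modify f.2 [] (fun cs => cs ++ kv.2))) (pm, md)).2.keys
      = PySem.Set.update md.keys (l.map (fun kv => pvLab lb kv.1)) := by
  intro l
  induction l with
  | nil => intro pm md h; simp [PySem.Set.update_nil]
  | cons kv l ih =>
    intro pm md h
    rw [List.foldl_cons]
    dsimp only
    obtain ⟨hr, hkf, hI⟩ := pvFind_spec keys0 lb (pm.size + 1) pm kv.1 h (pvFuel pm kv.1)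
    rw [ih _ _ hI, hr]
    have hmk : (md.modify (pvLab lb kv.1) [] (fun cs => cs ++ kv.2)).keys
        = PySem.Set.add md.keys (pvLab lb kv.1) := by
      rw [PySem.Dict.keys_modify, PySem.Set.add_eq_ite]
      by_cases hm : pvLab lb kv.1 ∈ md.keys
      · rw [PySem.Dict.keys_insert_of_contains _ _
            ((PySem.Dict.contains_iff_mem_keys _ _).mpr hm), if_pos hm]
      · rw [PySem.Dict.keys_insert_of_not_contains _ _
            (by rw [PySem.Dict.contains_eq_decide_mem_keys]; simpa using hm), if_neg hm]
    rw [hmk, List.map_cons, PySem.Set.update_cons]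

-- ===== VERDICT (by name: the statement is the Claim_ definition above) =====
theorem combine_group_spec : Claim_equal_combine_group := by
  unfold Claim_equal_combine_group
  intro coord_dict threshold _
  unfold Spec_combine_group combine_group combine_group_alt
  dsimp only
  set d := coord_dict.foldl (fun d t => d.insert (t.1, t.2.1) t.2.2) PySem.Dict.empty with hd
  obtain ⟨hcgk, hext, hnd0⟩ := pvBucket_rel d
  rw [hext]
  set keys0 := (pvBucketB d).keys with hkeys0
  set lb0 := keys0.foldl (fun lb g => lb.insert g g) PySem.Dict.empty with hlb0
  have hInv0 := pvInv_init keys0 hnd0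
  have hInvL := pvPairLoop_rel keys0 (pvBucketB d) threshold PySem.Dict.empty lb0 hInv0
  set pmF := pvPairLoopA keys0 (pvBucketB d) threshold PySem.Dict.empty with hpmF
  set lbF := pvPairLoopB keys0 (pvBucketB d) threshold lb0 with hlbF
  have hmk := pvMerge_keys keys0 lbF ((pvBucketA d).1.items) pmF PySem.Dict.empty hInvL
  have hlbFk : lbF.keys = keys0 := hInvL.2.2.1
  have hlbFnd : lbF.keys.Nodup := by rw [hlbFk]; exact hnd0
  have hvals : lbF.values = keys0.map (pvLab lbF) := by
    rw [PySem.Dict.values_eq_map_keys lbF hlbFnd 0, hlbFk]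
    exact List.map_congr_left (fun k hk => pvGetD_mem lbF k (by rw [hlbFk]; exact hk) 0)
  rw [pvSize, hmk, PySem.Dict.keys_empty, PySem.Set.update_nil_left, hvals]
  have hcgkeys : (pvBucketA d).1.keys = keys0 := by rw [hcgk, hext]
  have hmaps : ((pvBucketA d).1.items).map (fun kv => pvLab lbF kv.1)
      = keys0.map (pvLab lbF) := by
    rw [← hcgkeys]
    show ((pvBucketA d).1.items).map (fun kv => pvLab lbF kv.1)
        = (((pvBucketA d).1.items).map Prod.fst).map (pvLab lbF)
    rw [List.map_map]
    rfl
  rw [hmaps]
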